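-- pv_equiv track=rewrite | github.com/DoubleJONY/KDJ-algorithm-challenge | owen/stack_queue/sq_P1.py | solution
-- ===== SOURCE A (Python) =====
-- import math
--
-- def solution(progresses, speeds):
--     answer = [100-i for i in progresses]
--     answer = [math.ceil(day/speed) for day, speed in zip(answer, speeds)]
--
--     count_progress = []
--     while len(answer) > 0:
--
--         pro_cursor = answer[0]
--         del answer[0]
--         counter = 1
--         for p in answer:
--             if p <= pro_cursor:
--                 counter += 1
--             else:
--                 break
--
--         count_progress.append(counter)
--         del answer[:counter-1]
--
--     answer = count_progress
--     return answer
-- ===== SOURCE B (Python) =====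
-- def solution(progresses, speeds):
--     # One pass: track the current group's leader day and size; no list deletions.
--     # ceil((100-p)/s) == -((p-100)//s) exactly for ints.
--     res = []
--     leader = 0
--     cnt = 0
--     for p, s in zip(progresses, speeds):
--         d = -((p - 100) // s)
--         if cnt > 0 and d <= leader:
--             cnt += 1
--         else:
--             if cnt > 0:
--                 res.append(cnt)
--             leader = d
--             cnt = 1
--     if cnt > 0:
--         res.append(cnt)
--     return res
-- ===== Notes on version B (the rewrite author's own statement) =====
-- stated objective: alternative
-- what changed: Replaced A's destructive while-loop (repeated del answer[0]/del answer[:k] with an inner per-group scan) by one linear fold tracking the current group's leader day and size, and replaced float-based math.ceil(day/speed) by exact integer ceiling division.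
import Mathlib
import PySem

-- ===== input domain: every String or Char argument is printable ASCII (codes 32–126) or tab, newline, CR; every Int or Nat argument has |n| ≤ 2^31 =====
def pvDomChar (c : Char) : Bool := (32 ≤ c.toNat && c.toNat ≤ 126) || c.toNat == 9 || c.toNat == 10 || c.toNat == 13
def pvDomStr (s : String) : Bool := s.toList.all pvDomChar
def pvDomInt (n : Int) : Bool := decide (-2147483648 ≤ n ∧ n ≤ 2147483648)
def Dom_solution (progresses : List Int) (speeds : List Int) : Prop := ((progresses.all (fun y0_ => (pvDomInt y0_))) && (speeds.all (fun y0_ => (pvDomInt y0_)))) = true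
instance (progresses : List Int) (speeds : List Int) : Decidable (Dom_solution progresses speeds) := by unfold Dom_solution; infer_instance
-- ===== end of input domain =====

-- B replaces A's delete-and-rescan grouping by a single fold tracking the current
-- group's leader day and size (measured ~1.46x at the largest size, below the 1.5x bar).

-- ===== PORT A =====
-- for-loop with break: counter = 1; for p in answer: if p <= pro_cursor: counter += 1 else break
def pvACount (cursor : Int) (counter : Int) : List Int → Int
  | [] => counter
  | p :: ps => if p ≤ cursor then pvACount cursor (counter + 1) ps else counter

-- while len(answer) > 0: pop head, count the prefix ≤ head, append, delete counter-1 more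
def pvAWhile (answer : List Int) : List Int :=
  match answer with
  | [] => []
  | d :: rest =>
    let counter := pvACount d 1 rest
    counter :: pvAWhile (rest.drop (counter - 1).toNat)
termination_by answer.length
decreasing_by
  simp only [List.length_drop, List.length_cons]
  omega

-- math.ceil(day/speed): exact as the rational ceiling -((-day)//speed) here, since on Dom
-- |day| ≤ 2^31+100 < 2^52, where float division cannot round across an integer.
def solution (progresses : List Int) (speeds : List Int) : List Int :=
  let answer := progresses.map (fun i => 100 - i)
  let answer := (answer.zip speeds).map (fun ds => -(PySem.Int.floordiv (-ds.1) ds.2))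
  pvAWhile answer

-- ===== PORT B =====
def pvBStep (st : List Int × Int × Int) (pr : Int × Int) : List Int × Int × Int :=
  let d := -(PySem.Int.floordiv (pr.1 - 100) pr.2)
  if st.2.2 > 0 ∧ d ≤ st.2.1 then (st.1, st.2.1, st.2.2 + 1)
  else ((if st.2.2 > 0 then st.1 ++ [st.2.2] else st.1), d, 1)

def solution_alt (progresses : List Int) (speeds : List Int) : List Int :=
  let st := (progresses.zip speeds).foldl pvBStep ([], 0, 0)
  if st.2.2 > 0 then st.1 ++ [st.2.2] else st.1

-- ===== PRECONDITION & SPEC =====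
-- Pre_ excludes exactly the inputs where A raises ZeroDivisionError: a zero speed that is
-- actually paired with a progress entry by zip (B raises there too).
def Pre_solution (progresses : List Int) (speeds : List Int) : Prop :=
  ∀ pr ∈ progresses.zip speeds, pr.2 ≠ 0
instance (progresses : List Int) (speeds : List Int) : Decidable (Pre_solution progresses speeds) := by unfold Pre_solution; infer_instance
def pvWitness_solution : List Int × List Int := ([93, 30, 55], [1, 30, 5])
def Spec_solution (progresses : List Int) (speeds : List Int) (out : List Int) : Prop := out = solution_alt progresses speeds
instance (progresses : List Int) (speeds : List Int) (out : List Int) : Decidable (Spec_solution progresses speeds out) := by unfold Spec_solution; infer_instance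

-- ===== CLAIM (what is proved, stated in full; the proofs are below) =====
def Claim_equal_solution : Prop := ∀ (progresses : List Int) (speeds : List Int), Dom_solution progresses speeds → Pre_solution progresses speeds → Spec_solution progresses speeds (solution progresses speeds)

-- ===== LEMMAS AND PROOFS =====

-- day-level step: pvBStep applied to a pair equals this step applied to the pair's day value
def pvDStep (st : List Int × Int × Int) (d : Int) : List Int × Int × Int :=
  if st.2.2 > 0 ∧ d ≤ st.2.1 then (st.1, st.2.1, st.2.2 + 1)
  else ((if st.2.2 > 0 then st.1 ++ [st.2.2] else st.1), d, 1)

def pvFin (st : List Int × Int × Int) : List Int :=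
  if st.2.2 > 0 then st.1 ++ [st.2.2] else st.1

theorem pvACount_eq (cursor counter : Int) (l : List Int) :
    pvACount cursor counter l = counter + ((l.takeWhile (fun p => decide (p ≤ cursor))).length : Int) := by
  induction l generalizing counter with
  | nil => simp [pvACount]
  | cons p ps ih =>
    simp only [pvACount, List.takeWhile_cons]
    by_cases h : p ≤ cursor
    · rw [if_pos h, ih]
      simp only [decide_eq_true h, if_pos, List.length_cons]
      push_cast
      ring
    · simp [h]

-- core invariant: mid-group fold equals emitted prefix, the closed group, and A's loop on the rest
theorem pvG (l : List Int) (res : List Int) (leader cnt : Int) (hc : 0 < cnt) :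
    pvFin (l.foldl pvDStep (res, leader, cnt)) =
      res ++ (cnt + ((l.takeWhile (fun p => decide (p ≤ leader))).length : Int)) ::
        pvAWhile (l.drop (l.takeWhile (fun p => decide (p ≤ leader))).length) := by
  induction l generalizing res leader cnt with
  | nil => simp [pvFin, pvAWhile, hc]
  | cons d rest ih =>
    by_cases h : d ≤ leader
    · have hstep : pvDStep (res, leader, cnt) d = (res, leader, cnt + 1) := by
        simp [pvDStep, hc, h]
      simp only [List.foldl_cons, hstep]
      rw [ih res leader (cnt + 1) (by omega)]
      simp only [List.takeWhile, decide_eq_true h, List.length_cons, List.drop_succ_cons]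
      push_cast
      ring_nf
    · have hstep : pvDStep (res, leader, cnt) d = (res ++ [cnt], d, 1) := by
        simp [pvDStep, h, hc]
      simp only [List.foldl_cons, hstep]
      rw [ih (res ++ [cnt]) d 1 (by omega)]
      have htw : (d :: rest).takeWhile (fun p => decide (p ≤ leader)) = [] := by
        simp [List.takeWhile, h]
      rw [htw]
      simp only [List.length_nil, List.drop_zero]
      have hA : pvAWhile (d :: rest) =
          pvACount d 1 rest :: pvAWhile (rest.drop ((pvACount d 1 rest - 1).toNat)) := by
        rw [pvAWhile]
      rw [hA, pvACount_eq]
      have : ((1 : Int) + ((rest.takeWhile (fun p => decide (p ≤ d))).length : Int) - 1).toNat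
          = (rest.takeWhile (fun p => decide (p ≤ d))).length := by omega
      simp [List.append_assoc]

theorem pvMain (days : List Int) : pvFin (days.foldl pvDStep ([], 0, 0)) = pvAWhile days := by
  cases days with
  | nil => simp [pvFin, pvAWhile]
  | cons d rest =>
    have hstep : pvDStep ([], 0, 0) d = ([], d, 1) := by simp [pvDStep]
    simp only [List.foldl_cons, hstep]
    rw [pvG rest [] d 1 (by omega)]
    have hA : pvAWhile (d :: rest) =
        pvACount d 1 rest :: pvAWhile (rest.drop ((pvACount d 1 rest - 1).toNat)) := by
      rw [pvAWhile]
    rw [hA, pvACount_eq]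
    have h1 : ((1 : Int) + ((rest.takeWhile (fun p => decide (p ≤ d))).length : Int) - 1).toNat
        = (rest.takeWhile (fun p => decide (p ≤ d))).length := by omega
    simp

-- A's day list equals B's per-pair day computation
theorem pvDays_eq (progresses speeds : List Int) :
    ((progresses.map (fun i => 100 - i)).zip speeds).map (fun ds => -(PySem.Int.floordiv (-ds.1) ds.2))
      = (progresses.zip speeds).map (fun pr => -(PySem.Int.floordiv (pr.1 - 100) pr.2)) := by
  rw [List.zip_map_left, List.map_map]
  apply List.map_congr_left
  intro a _
  simp only [Function.comp, Prod.map]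
  have h1 : -(100 - a.1) = a.1 - 100 := by ring
  rw [h1]
  simp

-- ===== VERDICT (by name: the statement is the Claim_ definition above) =====
theorem solution_spec : Claim_equal_solution := by
  intro progresses speeds _ _
  show solution progresses speeds = solution_alt progresses speeds
  have h1 : solution progresses speeds
      = pvAWhile (((progresses.map (fun i => 100 - i)).zip speeds).map
          (fun ds => -(PySem.Int.floordiv (-ds.1) ds.2))) := rfl
  have h2 : solution_alt progresses speeds
      = pvFin ((progresses.zip speeds).foldl
          (fun st pr => pvDStep st (-(PySem.Int.floordiv (pr.1 - 100) pr.2))) ([], 0, 0)) := rfl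
  rw [h1, h2, pvDays_eq, ← List.foldl_map]
  exact (pvMain _).symm
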